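-- pv_equiv track=rewrite | github.com/6puritans9/Algorithms | Codetree/Exhaustive Search/Hard/Maximum H-Score 2.py | greedy_max_h_index
-- ===== SOURCE A (Python) =====
-- def greedy_max_h_index(n: int, l: int, citations: list[int]) -> int:
--     # TC = O(100 * N) = O(10^2 * 10^2) == 500ms
--     # SC = O(1)
--
--     MAX_INDEX = 100
--
--     max_h_index = 0
--     for i in range(1, MAX_INDEX + 1):
--         h_index = 0
--         added = 0
--
--         for citation in citations:
--             if citation >= i:
--                 h_index += 1
--             elif citation + 1 >= i and added < l:
--                 h_index += 1
--                 added += 1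
--
--         if h_index >= i:
--             max_h_index = i
--
--     return max_h_index
-- ===== SOURCE B (Python) =====
-- def greedy_max_h_index(n: int, l: int, citations: list[int]) -> int:
--     # Bucket-count the citations once (clamped to 100), then walk the
--     # candidate h-index downward with a running suffix sum, returning the
--     # first (= largest) feasible candidate: O(N + 100) instead of O(100 * N).
--     cnt = {}
--     for c in citations:
--         if c >= 0:
--             v = c if c < 100 else 100
--             cnt[v] = cnt.get(v, 0) + 1
--     ge = 0
--     for i in range(100, 0, -1):
--         ge += cnt.get(i, 0)
--         if ge + max(0, min(l, cnt.get(i - 1, 0))) >= i: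
--             return i
--     return 0
-- ===== Notes on version B (the rewrite author's own statement) =====
-- stated objective: faster
-- what changed: Replaces A's rescan of the whole citation list for each of the 100 candidate h-indices by a single bucket-counting pass (dict keyed by the citation value clamped at 100) followed by one downward sweep that maintains a running suffix sum and evaluates each candidate in O(1), returning at the first (largest) feasible candidate.
import Mathlib
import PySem

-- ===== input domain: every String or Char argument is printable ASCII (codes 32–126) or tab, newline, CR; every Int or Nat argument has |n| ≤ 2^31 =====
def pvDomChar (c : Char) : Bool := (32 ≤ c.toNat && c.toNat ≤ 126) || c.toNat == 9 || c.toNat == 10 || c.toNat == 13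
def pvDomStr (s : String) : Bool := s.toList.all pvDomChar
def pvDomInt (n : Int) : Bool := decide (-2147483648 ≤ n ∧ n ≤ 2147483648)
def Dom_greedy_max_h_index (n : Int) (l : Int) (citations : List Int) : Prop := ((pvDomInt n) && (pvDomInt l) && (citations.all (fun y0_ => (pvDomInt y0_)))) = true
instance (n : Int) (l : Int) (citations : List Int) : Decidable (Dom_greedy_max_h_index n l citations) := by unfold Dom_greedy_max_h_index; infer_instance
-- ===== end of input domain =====

-- B replaces A's rescan of all citations for each of the 100 candidates by one
-- bucket-counting pass (dict, values clamped at 100) plus one downward sweep with a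
-- running suffix sum; objective: faster (a single pass over the citations).

-- ===== PORT A =====
def greedy_max_h_index (n : Int) (l : Int) (citations : List Int) : Int :=
  -- for i in range(1, 100 + 1): inner loop state (h_index, added); keep last feasible i
  (PySem.List.pyRange 1 (100 + 1) 1).foldl (fun max_h_index i =>
    let p := citations.foldl (fun (st : Int × Int) citation =>
      if i ≤ citation then (st.1 + 1, st.2)
      else if i ≤ citation + 1 ∧ st.2 < l then (st.1 + 1, st.2 + 1)
      else st) (0, 0)
    if i ≤ p.1 then i else max_h_index) 0

-- ===== PORT B =====
-- 'c if c < 100 else 100'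
def pvClamp (c : Int) : Int := if c < 100 then c else 100

-- 'cnt[v] = cnt.get(v, 0) + 1' for v = clamp(c), over the citations with c >= 0
def pvBCnt (citations : List Int) : PySem.Dict Int Int :=
  citations.foldl (fun d c =>
    if 0 ≤ c then d.insert (pvClamp c) (d.getD (pvClamp c) 0 + 1)
    else d) PySem.Dict.empty

-- 'for i in range(100, 0, -1): ge += cnt.get(i,0); if ge + max(0,min(l,cnt.get(i-1,0))) >= i: return i'
def pvBLoop (l : Int) (cnt : PySem.Dict Int Int) : List Int → Int → Int
  | [], _ => 0
  | i :: rest, ge =>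
    let ge' := ge + cnt.getD i 0
    if i ≤ ge' + max 0 (min l (cnt.getD (i - 1) 0)) then i
    else pvBLoop l cnt rest ge'

def greedy_max_h_index_alt (n : Int) (l : Int) (citations : List Int) : Int :=
  pvBLoop l (pvBCnt citations) (PySem.List.pyRange 100 0 (-1)) 0

-- ===== PRECONDITION & SPEC =====
def Spec_greedy_max_h_index (n : Int) (l : Int) (citations : List Int) (out : Int) : Prop := out = greedy_max_h_index_alt n l citations
instance (n : Int) (l : Int) (citations : List Int) (out : Int) : Decidable (Spec_greedy_max_h_index n l citations out) := by unfold Spec_greedy_max_h_index; infer_instance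

-- ===== CLAIM (what is proved, stated in full; the proofs are below) =====
def Claim_equal_greedy_max_h_index : Prop := ∀ (n : Int) (l : Int) (citations : List Int), Dom_greedy_max_h_index n l citations → Spec_greedy_max_h_index n l citations (greedy_max_h_index n l citations)

-- ===== LEMMAS AND PROOFS =====

-- the clamped multiset of non-negative citations that pvBCnt counts
def pvM (cs : List Int) : List Int := (cs.filter (fun c => decide (0 ≤ c))).map pvClamp

-- common spec: the largest i in 1..k with (#{c ≥ i} + clamp(l, #{c = i-1})) ≥ i, else 0
def pvBest (l : Int) (cs : List Int) : Nat → Int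
  | 0 => 0
  | k + 1 =>
    if ((k : Int) + 1) ≤ (cs.countP (fun c => decide ((k : Int) + 1 ≤ c)) : Int)
        + max 0 (min l ((cs.count ((k : Int) + 1 - 1) : Int)))
    then (k : Int) + 1 else pvBest l cs k

lemma pvM_cons (c : Int) (t : List Int) :
    pvM (c :: t) = if 0 ≤ c then pvClamp c :: pvM t else pvM t := by
  simp only [pvM, List.filter_cons]
  by_cases h : 0 ≤ c <;> simp [h]

lemma pvM_le_100 (cs : List Int) : ∀ x ∈ pvM cs, x ≤ 100 := by
  intro x hx
  simp only [pvM, List.mem_map, List.mem_filter] at hx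
  obtain ⟨c, _, rfl⟩ := hx
  simp only [pvClamp]; split <;> omega

lemma countP_ge_pvM (cs : List Int) (i : Int) (h1 : 1 ≤ i) (h2 : i ≤ 100) :
    (pvM cs).countP (fun c => decide (i ≤ c)) = cs.countP (fun c => decide (i ≤ c)) := by
  induction cs with
  | nil => simp [pvM]
  | cons c t ih =>
    rw [pvM_cons]
    by_cases h0 : 0 ≤ c
    · simp only [if_pos h0, List.countP_cons, ih]
      have : decide (i ≤ pvClamp c) = decide (i ≤ c) := by
        simp only [pvClamp]; split <;> simp <;> omega
      rw [this]
    · simp only [if_neg h0, List.countP_cons, ih]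
      have : decide (i ≤ c) = false := by simp; omega
      simp [this]

lemma count_pvM (cs : List Int) (v : Int) (h0 : 0 ≤ v) (h1 : v < 100) :
    (pvM cs).count v = cs.count v := by
  induction cs with
  | nil => simp [pvM]
  | cons c t ih =>
    rw [pvM_cons]
    by_cases h : 0 ≤ c
    · simp only [if_pos h, List.count_cons, ih]
      have : (pvClamp c == v) = (c == v) := by
        simp only [pvClamp]; split <;> simp <;> omega
      rw [this]
    · simp only [if_neg h, List.count_cons, ih]
      have : (c == v) = false := by simp; omega
      simp [this]

lemma countP_split (xs : List Int) (j : Int) :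
    xs.countP (fun c => decide (j ≤ c)) = xs.countP (fun c => decide (j < c)) + xs.count j := by
  induction xs with
  | nil => simp
  | cons c t ih =>
    simp only [List.countP_cons, List.count_cons, ih]
    rcases lt_trichotomy c j with h|h|h
    · simp [show ¬ j ≤ c by omega, show ¬ j < c by omega, show (c == j) = false by simp; omega]
    · subst h
      simp
      omega
    · simp [show j ≤ c by omega, h, show (c == j) = false by simp; omega]
      omega

lemma getD_pvBCnt (cs : List Int) (v : Int) :
    (pvBCnt cs).getD v 0 = ((pvM cs).count v : Int) := by
  unfold pvBCnt pvM
  have h := PySem.List.foldl_ite_eq_foldl_filter (fun c => (0:Int) ≤ c)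
    (fun (d : PySem.Dict Int Int) (c : Int) => d.insert (pvClamp c) (d.getD (pvClamp c) 0 + 1)) cs PySem.Dict.empty
  beta_reduce at h
  rw [h]
  have h2 := (List.foldl_map (f := pvClamp)
    (g := fun (d : PySem.Dict Int Int) (v : Int) => d.insert v (d.getD v 0 + 1))
    (l := cs.filter (fun x => decide (0 ≤ x))) (init := PySem.Dict.empty)).symm
  beta_reduce at h2
  rw [h2, PySem.Dict.getD_foldl_insert_add_one]
  simp

-- A's inner loop over all citations, in closed form
lemma innerA (i l : Int) : ∀ (cs : List Int) (h a : Int),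
    cs.foldl (fun (st : Int × Int) citation =>
      if i ≤ citation then (st.1 + 1, st.2)
      else if i ≤ citation + 1 ∧ st.2 < l then (st.1 + 1, st.2 + 1)
      else st) (h, a)
    = (h + (cs.countP (fun c => decide (i ≤ c)) : Int)
        + (max a (min l (a + (cs.count (i - 1) : Int))) - a),
       max a (min l (a + (cs.count (i - 1) : Int)))) := by
  intro cs
  induction cs with
  | nil => intro h a; simp
  | cons c t ih =>
    intro h a
    simp only [List.foldl_cons, List.countP_cons, List.count_cons]
    by_cases h1 : i ≤ c
    · have hc : (c == i - 1) = false := by simp; omega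
      simp only [if_pos h1, ih, hc, decide_eq_true h1, if_true, Bool.false_eq_true, if_false,
        Nat.add_zero, Prod.mk.injEq, and_true]
      push_cast
      omega
    · by_cases hc : c = i - 1
      · subst hc
        have h2 : i ≤ (i - 1) + 1 := by omega
        have hcc : (i - 1 == i - 1) = true := by simp
        by_cases hl : a < l
        · simp only [if_neg h1, if_pos (And.intro h2 hl), ih, hcc, decide_eq_false h1, if_true,
            Bool.false_eq_true, if_false, Nat.add_zero, Prod.mk.injEq]
          refine ⟨by push_cast; omega, by push_cast; omega⟩
        · have h3 : ¬ (i ≤ (i - 1) + 1 ∧ a < l) := by tauto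
          simp only [if_neg h1, if_neg h3, ih, hcc, decide_eq_false h1, if_true,
            Bool.false_eq_true, if_false, Nat.add_zero, Prod.mk.injEq]
          refine ⟨by push_cast; omega, by push_cast; omega⟩
      · have h2 : ¬ (i ≤ c + 1 ∧ a < l) := by
          intro hb; exact absurd hb.1 (by omega)
        have hcc : (c == i - 1) = false := by simp; omega
        simp only [if_neg h1, if_neg h2, ih, hcc, decide_eq_false h1, Bool.false_eq_true,
          if_false, Nat.add_zero]

-- pyRange with step -1 unrolls from the top
lemma pyRange_down_cons (m : Nat) :
    PySem.List.pyRange ((m : Int) + 1) 0 (-1) = ((m : Int) + 1) :: PySem.List.pyRange (m : Int) 0 (-1) := by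
  simp only [PySem.List.pyRange]
  norm_num
  have h0 : (if 0 < m then m else 0) = m := by split <;> omega
  rw [h0, List.range_succ_eq_map, List.map_cons, List.map_map]
  congr 1 <;> norm_num

-- A's outer candidate scan, with the inner loop replaced by its closed form, computes pvBest
lemma A_fold_eq (l : Int) (cs : List Int) : ∀ k : Nat,
    (PySem.List.pyRange 1 ((k : Int) + 1) 1).foldl (fun max_h_index i =>
      if i ≤ (cs.countP (fun c => decide (i ≤ c)) : Int)
          + max 0 (min l ((cs.count (i - 1) : Int)))
      then i else max_h_index) 0 = pvBest l cs k := by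
  intro k
  induction k with
  | zero => simp [pvBest, PySem.List.pyRange]
  | succ k ih =>
    have hcast : ((k + 1 : Nat) : Int) + 1 = ((k : Int) + 1) + 1 := by push_cast; ring
    rw [hcast, PySem.List.pyRange_one_succ_right (by omega : (1:Int) ≤ (k : Int) + 1),
      List.foldl_append]
    simp only [List.foldl_cons, List.foldl_nil, ih]
    rfl

-- B's downward loop computes pvBest
lemma bloop_eq (l : Int) (cs : List Int) : ∀ k : Nat, k ≤ 100 →
    pvBLoop l (pvBCnt cs) (PySem.List.pyRange (k : Int) 0 (-1))
      (((pvM cs).countP (fun c => decide ((k : Int) < c)) : Int)) = pvBest l cs k := by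
  intro k
  induction k with
  | zero => intro _; simp [pvBLoop, PySem.List.pyRange, pvBest]
  | succ k ih =>
    intro hk
    have hcast : ((k + 1 : Nat) : Int) = (k : Int) + 1 := by push_cast; ring
    rw [hcast, pyRange_down_cons k]
    simp only [pvBLoop, getD_pvBCnt]
    have e3 : ((pvM cs).countP (fun c => decide ((k : Int) + 1 < c)) : Int)
        + ((pvM cs).count ((k : Int) + 1) : Int)
        = ((pvM cs).countP (fun c => decide ((k : Int) < c)) : Int) := by
      have h1 : (pvM cs).countP (fun c => decide ((k : Int) < c))
          = (pvM cs).countP (fun c => decide ((k : Int) + 1 ≤ c)) :=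
        List.countP_congr (by intro c _; simp only [decide_eq_true_eq]; omega)
      rw [h1, countP_split (pvM cs) ((k : Int) + 1)]
      push_cast; ring
    rw [e3]
    have e1 : ((pvM cs).countP (fun c => decide ((k : Int) < c)) : Int)
        = (cs.countP (fun c => decide ((k : Int) + 1 ≤ c)) : Int) := by
      have h1 : (pvM cs).countP (fun c => decide ((k : Int) < c))
          = (pvM cs).countP (fun c => decide ((k : Int) + 1 ≤ c)) :=
        List.countP_congr (by intro c _; simp only [decide_eq_true_eq]; omega)
      rw [h1, countP_ge_pvM cs ((k : Int) + 1) (by omega) (by omega)]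
    have e2 : ((pvM cs).count ((k : Int) + 1 - 1) : Int) = (cs.count ((k : Int) + 1 - 1) : Int) := by
      have h1 : (k : Int) + 1 - 1 = (k : Int) := by ring
      rw [h1]
      exact_mod_cast congrArg Nat.cast (count_pvM cs (k : Int) (by omega) (by omega))
    rw [ih (by omega)]
    simp only [pvBest]
    exact if_congr (by rw [e1, e2]) rfl rfl

-- ===== VERDICT (by name: the statement is the Claim_ definition above) =====
theorem greedy_max_h_index_spec : Claim_equal_greedy_max_h_index := by
  intro n l cs _
  unfold Spec_greedy_max_h_index greedy_max_h_index greedy_max_h_index_alt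
  have hport : ∀ (acc i : Int),
      (let p := cs.foldl (fun (st : Int × Int) citation =>
        if i ≤ citation then (st.1 + 1, st.2)
        else if i ≤ citation + 1 ∧ st.2 < l then (st.1 + 1, st.2 + 1)
        else st) (0, 0)
       if i ≤ p.1 then i else acc)
      = (if i ≤ (cs.countP (fun c => decide (i ≤ c)) : Int)
          + max 0 (min l ((cs.count (i - 1) : Int))) then i else acc) := by
    intro acc i
    show (if i ≤ (cs.foldl (fun (st : Int × Int) citation =>
        if i ≤ citation then (st.1 + 1, st.2)
        else if i ≤ citation + 1 ∧ st.2 < l then (st.1 + 1, st.2 + 1)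
        else st) (0, 0)).1 then i else acc) = _
    rw [innerA]
    norm_num
  have hA2 : (PySem.List.pyRange 1 (100 + 1) 1).foldl (fun max_h_index i =>
      let p := cs.foldl (fun (st : Int × Int) citation =>
        if i ≤ citation then (st.1 + 1, st.2)
        else if i ≤ citation + 1 ∧ st.2 < l then (st.1 + 1, st.2 + 1)
        else st) (0, 0)
      if i ≤ p.1 then i else max_h_index) 0
      = (PySem.List.pyRange 1 (100 + 1) 1).foldl (fun max_h_index i =>
      if i ≤ (cs.countP (fun c => decide (i ≤ c)) : Int)
          + max 0 (min l ((cs.count (i - 1) : Int)))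
      then i else max_h_index) 0 :=
    PySem.List.foldl_congr_mem _ _ _ _ (fun acc x _ => hport acc x)
  rw [hA2]
  have hA := A_fold_eq l cs 100
  have hB := bloop_eq l cs 100 (by omega)
  have hz : (pvM cs).countP (fun c => decide ((100 : Int) < c)) = 0 := by
    rw [List.countP_eq_zero]
    intro x hx
    have := pvM_le_100 cs x hx
    simp only [decide_eq_true_eq]
    omega
  push_cast at hA hB
  rw [(by norm_num : (100:Int) + 1 = 101)]
  rw [hz] at hB
  norm_num at hB
  rw [hA, ← hB]
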